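-- pv_equiv track=rewrite | github.com/wilmurillo-ai/Design-Assistant | .skills/openclaw-skills/skills/meilihulee/modelpool-free/scripts/freeswitch.py | build_fallback_chain
-- ===== SOURCE A (Python) =====
-- def build_fallback_chain(keys, model_groups):
--     """Build interleaved fallback chain across keys."""
--     chain = []
--     max_len = max(len(g) for g in model_groups)
--     for i in range(max_len):
--         for k_idx, group in enumerate(model_groups):
--             if i < len(group):
--                 provider = f"openrouter" if k_idx == 0 else f"openrouter{k_idx + 1}"
--                 model_id = group[i]["id"]
--                 chain.append(f"{provider}/{model_id}")
--     return chain
-- ===== SOURCE B (Python) =====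
-- def build_fallback_chain(keys, model_groups):
--     """Build interleaved fallback chain across keys (column-wise transpose)."""
--     rows = [("openrouter" if k == 0 else "openrouter%d" % (k + 1), list(g))
--             for k, g in enumerate(model_groups)]
--     chain = []
--     while any(g for _, g in rows):
--         chain += [p + "/" + g[0]["id"] for p, g in rows if g]
--         rows = [(p, g[1:]) for p, g in rows]
--     return chain
-- ===== Notes on version B (the rewrite author's own statement) =====
-- stated objective: alternative
-- what changed: A loops an index i over range(max_len) and re-tests i < len(group) with a per-cell group[i] index for every group in every round; B pairs each group with its provider string once, then builds the chain by repeatedly emitting the heads of the rows and peeling to their tails (an explicit transpose), with no max(), no index arithmetic and no bounds test.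
import Mathlib
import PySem

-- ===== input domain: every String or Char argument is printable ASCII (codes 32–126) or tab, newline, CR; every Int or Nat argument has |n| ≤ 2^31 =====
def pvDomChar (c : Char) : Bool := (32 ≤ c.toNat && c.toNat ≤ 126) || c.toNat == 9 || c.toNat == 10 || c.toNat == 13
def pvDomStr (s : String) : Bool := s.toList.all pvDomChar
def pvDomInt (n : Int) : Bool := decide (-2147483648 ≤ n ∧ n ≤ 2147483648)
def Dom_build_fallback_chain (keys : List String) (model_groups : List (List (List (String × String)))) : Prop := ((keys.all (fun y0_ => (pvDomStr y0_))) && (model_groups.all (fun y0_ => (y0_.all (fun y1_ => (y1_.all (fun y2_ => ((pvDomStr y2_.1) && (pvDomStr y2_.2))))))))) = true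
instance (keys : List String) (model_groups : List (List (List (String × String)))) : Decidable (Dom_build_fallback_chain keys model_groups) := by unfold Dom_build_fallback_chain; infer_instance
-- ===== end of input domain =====

-- B builds the chain column-wise by pairing each group with its provider once and repeatedly
-- peeling the heads of the rows (an explicit transpose), instead of A's index loop over
-- range(max_len) with a per-cell bounds test (objective: alternative decomposition, same cost).

-- provider string for group index k (the f-string both Pythons compute)
def pvProvider (k : Int) : String :=
  if k = 0 then "openrouter" else "openrouter" ++ PySem.Int.toStr (k + 1)

-- d["id"]: first-match association-list lookup (Python dict access; Pre_ guarantees the key exists)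
def pvId (d : List (String × String)) : String := (d.lookup "id").getD ""

-- ===== PORT A =====
def build_fallback_chain (keys : List String) (model_groups : List (List (List (String × String)))) : List String :=
  match PySem.List.max? (model_groups.map (fun g => (g.length : Int))) (fun x => x) with
  | none => []  -- Python: max() raises ValueError here (empty model_groups; excluded by Pre_)
  | some max_len =>
    (PySem.List.pyRange 0 max_len 1).foldl (fun chain i =>
      (PySem.List.enumerate model_groups).foldl (fun chain kg =>
        if i < (kg.2.length : Int) then
          chain ++ [pvProvider kg.1 ++ "/" ++ pvId (PySem.List.pyGetD kg.2 i [])]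
        else chain) chain) []

-- ===== PORT B =====
-- one round of the while loop: the comprehension over the still-nonempty rows
def pvEmitRow (rows : List (String × List (List (String × String)))) : List String :=
  rows.filterMap (fun pg => pg.2.head?.map (fun d => pg.1 ++ "/" ++ pvId d))

-- termination of B's while loop: peeling the heads weakly/strictly shrinks the total length
theorem pvSumTailLe (rows : List (String × List (List (String × String)))) :
    ((rows.map (fun pg => (pg.1, pg.2.tail))).map (fun pg => pg.2.length)).sum
      ≤ (rows.map (fun pg => pg.2.length)).sum := by
  induction rows with
  | nil => simp
  | cons pg rows ih =>
    simp only [List.map_cons, List.sum_cons]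
    have : pg.2.tail.length ≤ pg.2.length := by cases pg.2 <;> simp
    omega

theorem pvSumTailLt (rows : List (String × List (List (String × String))))
    (h : rows.any (fun pg => !pg.2.isEmpty) = true) :
    ((rows.map (fun pg => (pg.1, pg.2.tail))).map (fun pg => pg.2.length)).sum
      < (rows.map (fun pg => pg.2.length)).sum := by
  induction rows with
  | nil => simp at h
  | cons pg rows ih =>
    simp only [List.map_cons, List.sum_cons]
    simp only [List.any_cons, Bool.or_eq_true] at h
    rcases h with h | h
    · have hlt : pg.2.tail.length < pg.2.length := by
        cases hg : pg.2 <;> simp [hg] at h ⊢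
      have := pvSumTailLe rows
      omega
    · have h1 := ih h
      have : pg.2.tail.length ≤ pg.2.length := by cases pg.2 <;> simp
      omega

-- 'while any(g for _, g in rows):'
def pvAltLoop (rows : List (String × List (List (String × String)))) (chain : List String) : List String :=
  if h : rows.any (fun pg => !pg.2.isEmpty) = true then
    pvAltLoop (rows.map (fun pg => (pg.1, pg.2.tail))) (chain ++ pvEmitRow rows)
  else chain
termination_by (rows.map (fun pg => pg.2.length)).sum
decreasing_by
  simp only [List.map_map, Function.comp_def]
  rw [List.attach_map_val (l := rows) (f := fun pg => pg.2.tail.length)]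
  simpa [List.map_map, Function.comp_def] using pvSumTailLt rows h

-- rows = [(provider_k, list(g)) for k, g in enumerate(model_groups)]
def pvRows (model_groups : List (List (List (String × String)))) : List (String × List (List (String × String))) :=
  (PySem.List.enumerate model_groups).map (fun kg => (pvProvider kg.1, kg.2))

def build_fallback_chain_alt (keys : List String) (model_groups : List (List (List (String × String)))) : List String :=
  pvAltLoop (pvRows model_groups) []

-- ===== PRECONDITION & SPEC =====
-- Pre_ excludes exactly the inputs where Python A raises: empty model_groups (ValueError from
-- max() of an empty sequence) and any model dict without key "id" (KeyError, raised by both A and B).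
def Pre_build_fallback_chain (keys : List String) (model_groups : List (List (List (String × String)))) : Prop :=
  model_groups ≠ [] ∧ ∀ g ∈ model_groups, ∀ d ∈ g, (d.lookup "id").isSome = true
instance (keys : List String) (model_groups : List (List (List (String × String)))) : Decidable (Pre_build_fallback_chain keys model_groups) := by unfold Pre_build_fallback_chain; infer_instance

def pvWitness_build_fallback_chain : List String × (List (List (List (String × String)))) :=
  (["k1", "k2"], [[[("id", "a1")], [("id", "a2")]], [[("id", "b1")]]])

def Spec_build_fallback_chain (keys : List String) (model_groups : List (List (List (String × String)))) (out : List String) : Prop := out = build_fallback_chain_alt keys model_groups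
instance (keys : List String) (model_groups : List (List (List (String × String)))) (out : List String) : Decidable (Spec_build_fallback_chain keys model_groups out) := by unfold Spec_build_fallback_chain; infer_instance

-- ===== CLAIM (what is proved, stated in full; the proofs are below) =====
def Claim_equal_build_fallback_chain : Prop := ∀ (keys : List String) (model_groups : List (List (List (String × String)))), Dom_build_fallback_chain keys model_groups → Pre_build_fallback_chain keys model_groups → Spec_build_fallback_chain keys model_groups (build_fallback_chain keys model_groups)

-- ===== LEMMAS AND PROOFS =====

-- the cells A emits for column i, as a filter+map shape over the provider/group rows
def pvEmitAt (i : Int) (rows : List (String × List (List (String × String)))) : List String :=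
  (rows.filter (fun pg => decide (i < (pg.2.length : Int)))).map
    (fun pg => pg.1 ++ "/" ++ pvId (PySem.List.pyGetD pg.2 i []))

theorem pvInner_eq (i : Int) (model_groups : List (List (List (String × String)))) (chain : List String) :
    (PySem.List.enumerate model_groups).foldl (fun chain kg =>
        if i < (kg.2.length : Int) then
          chain ++ [pvProvider kg.1 ++ "/" ++ pvId (PySem.List.pyGetD kg.2 i [])]
        else chain) chain
      = chain ++ pvEmitAt i (pvRows model_groups) := by
  have hfun : (fun (chain : List String) (kg : Int × List (List (String × String))) =>
        if i < (kg.2.length : Int) then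
          chain ++ [pvProvider kg.1 ++ "/" ++ pvId (PySem.List.pyGetD kg.2 i [])]
        else chain)
      = (fun chain kg =>
        if (fun (kg : Int × List (List (String × String))) => decide (i < (kg.2.length : Int))) kg = true then
          chain ++ [(fun (kg : Int × List (List (String × String))) => pvProvider kg.1 ++ "/" ++ pvId (PySem.List.pyGetD kg.2 i [])) kg]
        else chain) := by
    funext c kg; simp
  rw [hfun, PySem.List.foldl_append_if]
  unfold pvEmitAt pvRows
  rw [List.filter_map, List.map_map]
  rfl

theorem pvEmitRow_eq (rows : List (String × List (List (String × String)))) :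
    pvEmitRow rows = pvEmitAt 0 rows := by
  induction rows with
  | nil => rfl
  | cons pg rows ih =>
    unfold pvEmitRow pvEmitAt at *
    cases hg : pg.2 with
    | nil => simpa [hg] using ih
    | cons d t => simpa [hg, PySem.List.pyGetD_zero_cons] using ih

theorem pvEmitAt_tail (j : Nat) (rows : List (String × List (List (String × String)))) :
    pvEmitAt ((j : Int) + 1) rows = pvEmitAt (j : Int) (rows.map (fun pg => (pg.1, pg.2.tail))) := by
  unfold pvEmitAt
  rw [List.filter_map, List.map_map]
  have hc : ((j : Int) + 1) = ((j + 1 : Nat) : Int) := by push_cast; ring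
  have hP : ((fun pg => decide ((j : Int) < (pg.2.length : Int))) ∘ (fun (pg : String × List (List (String × String))) => (pg.1, pg.2.tail)))
      = (fun pg => decide ((j : Int) + 1 < (pg.2.length : Int))) := by
    funext pg
    obtain ⟨p, g⟩ := pg
    cases g <;> simp <;> omega
  have hF : ((fun pg => pg.1 ++ "/" ++ pvId (PySem.List.pyGetD pg.2 (j : Int) [])) ∘ (fun (pg : String × List (List (String × String))) => (pg.1, pg.2.tail)))
      = (fun pg => pg.1 ++ "/" ++ pvId (PySem.List.pyGetD pg.2 ((j : Int) + 1) [])) := by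
    funext pg
    obtain ⟨p, g⟩ := pg
    rw [hc]
    cases g with
    | nil => simp only [Function.comp_apply, List.tail_nil, PySem.List.pyGetD_natCast]; rfl
    | cons d t =>
      simp only [Function.comp_apply, List.tail_cons, PySem.List.pyGetD_natCast, List.getD_cons_succ]
  rw [hP, hF]

theorem pvEmitAt_nil_of_all_empty (j : Nat) (rows : List (String × List (List (String × String))))
    (h : rows.any (fun pg => !pg.2.isEmpty) = false) :
    pvEmitAt (j : Int) rows = [] := by
  unfold pvEmitAt
  rw [List.filter_eq_nil_iff.mpr, List.map_nil]
  intro pg hpg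
  have h2 := (List.any_eq_false.mp h) pg hpg
  have h3 : pg.2 = [] := by cases hg : pg.2 <;> simp_all
  simp [h3]

theorem pvAltLoop_eq (n : Nat) :
    ∀ (rows : List (String × List (List (String × String)))) (chain : List String),
      (∀ pg ∈ rows, pg.2.length ≤ n) →
      pvAltLoop rows chain = chain ++ (List.range n).flatMap (fun (j : Nat) => pvEmitAt (j : Int) rows) := by
  induction n with
  | zero =>
    intro rows chain hb
    have hany : rows.any (fun pg => !pg.2.isEmpty) = false := by
      rw [List.any_eq_false]
      intro pg hpg
      have h0 : pg.2 = [] := List.length_eq_zero_iff.mp (Nat.le_zero.mp (hb pg hpg))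
      simp [h0]
    unfold pvAltLoop
    simp [hany]
  | succ n ih =>
    intro rows chain hb
    by_cases hany : rows.any (fun pg => !pg.2.isEmpty) = true
    · unfold pvAltLoop
      rw [dif_pos hany]
      rw [ih (rows.map (fun pg => (pg.1, pg.2.tail))) (chain ++ pvEmitRow rows) ?_]
      · rw [List.range_succ_eq_map]
        simp only [List.flatMap_cons, List.flatMap_map, Nat.cast_zero]
        rw [pvEmitRow_eq, List.append_assoc]
        congr 1
        congr 1
        have hfun : (fun (a : Nat) => pvEmitAt ((a.succ : Nat) : Int) rows)
            = (fun (j : Nat) => pvEmitAt (j : Int) (rows.map (fun pg => (pg.1, pg.2.tail)))) := by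
          funext j
          rw [show ((j.succ : Nat) : Int) = ((j : Int) + 1) by push_cast; ring, pvEmitAt_tail]
        rw [hfun]
      · intro pg hpg
        rcases List.mem_map.mp hpg with ⟨qg, hqg, rfl⟩
        have h1 := hb qg hqg
        have h2 : qg.2.tail.length ≤ qg.2.length - 1 := by cases qg.2 <;> simp
        show qg.2.tail.length ≤ n
        omega
    · unfold pvAltLoop
      rw [dif_neg hany]
      have hfalse : rows.any (fun pg => !pg.2.isEmpty) = false := by
        simpa using hany
      have hnil : (List.range (n+1)).flatMap (fun (j : Nat) => pvEmitAt (j : Int) rows) = [] := by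
        apply List.flatMap_eq_nil_iff.mpr
        intro j hj
        exact pvEmitAt_nil_of_all_empty j rows hfalse
      rw [hnil, List.append_nil]

theorem pvA_eq (keys : List String) (model_groups : List (List (List (String × String)))) (m : Int)
    (hmax : PySem.List.max? (model_groups.map (fun g => (g.length : Int))) (fun x => x) = some m) :
    build_fallback_chain keys model_groups
      = (List.range m.toNat).flatMap (fun (j : Nat) => pvEmitAt (j : Int) (pvRows model_groups)) := by
  unfold build_fallback_chain
  rw [hmax]
  show (PySem.List.pyRange 0 m 1).foldl (fun chain i =>
      (PySem.List.enumerate model_groups).foldl (fun chain kg =>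
        if i < (kg.2.length : Int) then
          chain ++ [pvProvider kg.1 ++ "/" ++ pvId (PySem.List.pyGetD kg.2 i [])]
        else chain) chain) [] = _
  rw [PySem.List.pyRange_one]
  simp only [sub_zero]
  rw [List.foldl_map]
  have hfun : (fun (chain : List String) (k : Nat) =>
      (PySem.List.enumerate model_groups).foldl (fun chain kg =>
        if 0 + (k : Int) < (kg.2.length : Int) then
          chain ++ [pvProvider kg.1 ++ "/" ++ pvId (PySem.List.pyGetD kg.2 (0 + (k : Int)) [])]
        else chain) chain)
      = (fun (chain : List String) (k : Nat) => chain ++ pvEmitAt (k : Int) (pvRows model_groups)) := by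
    funext chain k
    rw [show (0 + (k : Int)) = (k : Int) by ring]
    exact pvInner_eq (k : Int) model_groups chain
  rw [hfun, PySem.List.foldl_append_eq_flatMap, List.nil_append]

-- ===== VERDICT (by name: the statement is the Claim_ definition above) =====
theorem build_fallback_chain_spec : Claim_equal_build_fallback_chain := by
  intro keys model_groups hdom hpre
  unfold Spec_build_fallback_chain
  obtain ⟨hne, _⟩ := hpre
  cases hmax : PySem.List.max? (model_groups.map (fun g => (g.length : Int))) (fun x => x) with
  | none =>
    exact absurd (List.map_eq_nil_iff.mp ((PySem.List.max?_eq_none_iff _ _).mp hmax)) hne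
  | some m =>
    have hbound : ∀ pg ∈ pvRows model_groups, pg.2.length ≤ m.toNat := by
      intro pg hpg
      rcases List.mem_map.mp hpg with ⟨kg, hkg, rfl⟩
      have hmem : kg.2 ∈ model_groups := by
        have := List.mem_map_of_mem (f := fun x => x.2) hkg
        rwa [PySem.List.map_snd_enumerate] at this
      have := PySem.List.max?_isMax hmax ((kg.2.length : Int))
        (List.mem_map_of_mem (f := fun g => (g.length : Int)) hmem)
      simp only at this ⊢
      omega
    rw [pvA_eq keys model_groups m hmax]
    unfold build_fallback_chain_alt
    rw [pvAltLoop_eq m.toNat (pvRows model_groups) [] hbound, List.nil_append]
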